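-- pv_equiv track=rewrite | github.com/pypi-data/pypi-mirror-281 | packages/lc-wifi/lc_wifi-2024.6.26.tar.gz/lc_wifi-2024.6.26/src/wifi/core/expert.py | op_standard
-- ===== SOURCE A (Python) =====
-- def op_standard(radio):
--     os = radio.get('OperatingStandards') or ''
--     numbers = {
--         '2': [['n', 4], ['g', 3], ['b', 2]],
--         '5': [['ax', 7], ['ac', 6], ['n', 5]],
--     }
--     for std, nr in numbers[radio['band']]:
--         if std in os:
--             return nr
--     return 1
-- ===== SOURCE B (Python) =====
-- def op_standard(radio):
--     os = radio.get('OperatingStandards') or ''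
--     single, pair = {
--         '2': ({'n': 4, 'g': 3, 'b': 2}, {}),
--         '5': ({'n': 5}, {'x': 7, 'c': 6}),
--     }[radio['band']]
--     best, prev = 1, ''
--     for c in os:
--         r = single.get(c, 1)
--         if prev == 'a':
--             r = max(r, pair.get(c, 1))
--         if r > best:
--             best = r
--         prev = c
--     return best
-- ===== Notes on version B (the rewrite author's own statement) =====
-- stated objective: alternative
-- what changed: Replaces A's scan of the band's (substring, rank) table with substring tests by a single left-to-right pass over the OperatingStandards string itself: a one-character-lookbehind automaton scores each character (per-band char dict, pair ranks fire when the previous char is 'a') and keeps a running maximum.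
import Mathlib
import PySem

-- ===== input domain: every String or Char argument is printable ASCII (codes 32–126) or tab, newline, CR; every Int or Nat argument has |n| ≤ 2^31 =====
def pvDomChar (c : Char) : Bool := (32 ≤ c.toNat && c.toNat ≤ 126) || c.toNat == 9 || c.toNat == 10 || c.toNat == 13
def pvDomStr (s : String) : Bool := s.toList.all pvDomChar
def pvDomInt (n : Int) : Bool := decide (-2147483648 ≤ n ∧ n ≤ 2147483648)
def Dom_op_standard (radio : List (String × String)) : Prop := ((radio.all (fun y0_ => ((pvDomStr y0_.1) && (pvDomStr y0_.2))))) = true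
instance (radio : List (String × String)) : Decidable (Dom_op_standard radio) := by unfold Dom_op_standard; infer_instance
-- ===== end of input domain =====

-- B replaces A's scan of the band's (substring, rank) table by a single pass over the
-- OperatingStandards string itself: a one-character-lookbehind automaton with a running maximum.

-- ===== PORT A =====
-- the for-loop with early return, over the band's (std, nr) list
def opStdLoop (os : String) : List (String × Int) → Int
  | [] => 1
  | (std, nr) :: rest => if PySem.Str.isIn std os then nr else opStdLoop os rest

def op_standard (radio : List (String × String)) : Int :=
  -- os = radio.get('OperatingStandards') or ''
  let os : String := match List.lookup "OperatingStandards" radio with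
    | some s => if s = "" then "" else s
    | none => ""
  match List.lookup "band" radio with
  | none => 0  -- KeyError in Python: excluded by Pre_
  | some b =>
    if b = "2" then opStdLoop os [("n", 4), ("g", 3), ("b", 2)]
    else if b = "5" then opStdLoop os [("ax", 7), ("ac", 6), ("n", 5)]
    else 0  -- KeyError in Python: excluded by Pre_

-- ===== PORT B =====
-- one loop iteration: r = single.get(c, 1); if prev == 'a': r = max(r, pair.get(c, 1));
-- if r > best: best = r; prev = c
def altStep (single pair : PySem.Dict Char Int) (st : Int × String) (c : Char) : Int × String :=
  let r := single.getD c 1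
  let r := if st.2 = "a" then max r (pair.getD c 1) else r
  (if r > st.1 then r else st.1, String.singleton c)

def op_standard_alt (radio : List (String × String)) : Int :=
  let os : String := match List.lookup "OperatingStandards" radio with
    | some s => if s = "" then "" else s
    | none => ""
  match List.lookup "band" radio with
  | none => 0  -- KeyError in Python: excluded by Pre_
  | some b =>
    if b = "2" then
      (os.toList.foldl
        (altStep (PySem.Dict.mk [('n', 4), ('g', 3), ('b', 2)]) (PySem.Dict.mk [])) (1, "")).1
    else if b = "5" then
      (os.toList.foldl
        (altStep (PySem.Dict.mk [('n', 5)]) (PySem.Dict.mk [('x', 7), ('c', 6)])) (1, "")).1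
    else 0  -- KeyError in Python: excluded by Pre_

-- ===== PRECONDITION & SPEC =====
-- Pre_ excludes exactly the inputs where Python raises KeyError: a missing 'band' key or a band other than '2'/'5'.
def Pre_op_standard (radio : List (String × String)) : Prop :=
  List.lookup "band" radio = some "2" ∨ List.lookup "band" radio = some "5"
instance (radio : List (String × String)) : Decidable (Pre_op_standard radio) := by
  unfold Pre_op_standard; infer_instance

def pvWitness_op_standard : (List (String × String)) := [("band", "2"), ("OperatingStandards", "g,n")]

def Spec_op_standard (radio : List (String × String)) (out : Int) : Prop := out = op_standard_alt radio
instance (radio : List (String × String)) (out : Int) : Decidable (Spec_op_standard radio out) := by unfold Spec_op_standard; infer_instance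

-- ===== CLAIM =====
def Claim_equal_op_standard : Prop := ∀ (radio : List (String × String)), Dom_op_standard radio → Pre_op_standard radio → Spec_op_standard radio (op_standard radio)

-- ===== LEMMAS AND PROOFS =====

-- adjacency: some character equal to 'a' immediately followed by x
def adjA (x : Char) : List Char → Bool
  | c :: d :: l => (c = 'a' && d = x) || adjA x (d :: l)
  | _ => false

lemma adjA_cons_ne {c : Char} (x : Char) (t : List Char) (hc : c ≠ 'a') :
    adjA x (c :: t) = adjA x t := by
  cases t <;> simp [adjA, hc]

lemma adjA_iff (x : Char) (l : List Char) : adjA x l = true ↔ ['a', x] <:+: l := by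
  induction l with
  | nil => simp [adjA]
  | cons c t ih =>
    cases t with
    | nil =>
      simp only [adjA, Bool.false_eq_true, false_iff]
      intro h; have := h.length_le; simp at this
    | cons d t' =>
      rw [List.infix_cons_iff]
      simp only [adjA, Bool.or_eq_true, Bool.and_eq_true, decide_eq_true_eq, ih,
        List.cons_prefix_cons]
      constructor
      · rintro (⟨rfl, rfl⟩ | h)
        · exact Or.inl ⟨rfl, by simp⟩
        · exact Or.inr h
      · rintro (⟨rfl, h⟩ | h)
        · exact Or.inl ⟨rfl, by simpa [eq_comm] using h⟩
        · exact Or.inr h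

-- max-form score of a band-2 string
def g2 (l : List Char) : Int :=
  max (max (if 'n' ∈ l then 4 else 1) (if 'g' ∈ l then 3 else 1)) (if 'b' ∈ l then 2 else 1)

-- max-form score of a band-5 string (pair ranks via adjacency after 'a')
def g5 (l : List Char) : Int :=
  max (max (if adjA 'x' l then 7 else 1) (if adjA 'c' l then 6 else 1)) (if 'n' ∈ l then 5 else 1)

lemma one_le_g2 (l : List Char) : 1 ≤ g2 l := by unfold g2; split_ifs <;> omega
lemma one_le_g5 (l : List Char) : 1 ≤ g5 l := by unfold g5; split_ifs <;> omega

def s2 : PySem.Dict Char Int := PySem.Dict.mk [('n', 4), ('g', 3), ('b', 2)]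
def s5 : PySem.Dict Char Int := PySem.Dict.mk [('n', 5)]
def p5 : PySem.Dict Char Int := PySem.Dict.mk [('x', 7), ('c', 6)]
def p2 : PySem.Dict Char Int := PySem.Dict.mk []

lemma s2_getD (c : Char) :
    s2.getD c 1 = if c = 'n' then 4 else if c = 'g' then 3 else if c = 'b' then 2 else 1 := by
  rcases eq_or_ne c 'n' with rfl | h1
  · decide
  rcases eq_or_ne c 'g' with rfl | h2
  · decide
  rcases eq_or_ne c 'b' with rfl | h3
  · decide
  simp [s2, PySem.Dict.getD_eq_get?_getD, PySem.Dict.get?, List.find?, h1, h2, h3,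
    beq_eq_false_iff_ne.mpr (Ne.symm h1), beq_eq_false_iff_ne.mpr (Ne.symm h2),
    beq_eq_false_iff_ne.mpr (Ne.symm h3)]

lemma s5_getD (c : Char) : s5.getD c 1 = if c = 'n' then 5 else 1 := by
  rcases eq_or_ne c 'n' with rfl | h1
  · decide
  simp [s5, PySem.Dict.getD_eq_get?_getD, PySem.Dict.get?, List.find?, h1,
    beq_eq_false_iff_ne.mpr (Ne.symm h1)]

lemma p5_getD (c : Char) : p5.getD c 1 = if c = 'x' then 7 else if c = 'c' then 6 else 1 := by
  rcases eq_or_ne c 'x' with rfl | h1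
  · decide
  rcases eq_or_ne c 'c' with rfl | h2
  · decide
  simp [p5, PySem.Dict.getD_eq_get?_getD, PySem.Dict.get?, List.find?, h1, h2,
    beq_eq_false_iff_ne.mpr (Ne.symm h1), beq_eq_false_iff_ne.mpr (Ne.symm h2)]

lemma p2_getD (c : Char) : p2.getD c 1 = 1 := by
  simp [p2, PySem.Dict.getD_eq_get?_getD, PySem.Dict.get?]

lemma fold2 (l : List Char) : ∀ (best : Int) (prev : String), 1 ≤ best →
    (l.foldl (altStep s2 p2) (best, prev)).1 = max best (g2 l) := by
  induction l with
  | nil => intro best prev h; simp [g2]; omega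
  | cons c t ih =>
    intro best prev h
    have h1 : 1 ≤ s2.getD c 1 := by rw [s2_getD]; split_ifs <;> omega
    have hstep : altStep s2 p2 (best, prev) c
        = (max best (s2.getD c 1), String.singleton c) := by
      simp only [altStep, p2_getD, Prod.mk.injEq]
      split_ifs <;> exact ⟨by omega, trivial⟩
    rw [List.foldl_cons, hstep, ih _ _ (by omega)]
    have hc : max (s2.getD c 1) (g2 t) = g2 (c :: t) := by
      clear ih hstep h h1
      rw [s2_getD]
      unfold g2
      simp only [List.mem_cons]
      split_ifs <;> first | omega | (exfalso; tauto)
    omega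

-- context: a trailing 'a' in prev acts like a leading 'a' on the rest of the string
def ctx (prev : String) : List Char := if prev = "a" then ['a'] else []

lemma singleton_eq_a (c : Char) : (String.singleton c = "a") ↔ c = 'a' := by
  constructor
  · intro h
    have : (String.singleton c).toList = ("a" : String).toList := by rw [h]
    simpa [String.singleton] using this
  · rintro rfl; rfl

lemma ctx_a : ctx "a" = ['a'] := by simp [ctx]

lemma ctx_ne {s : String} (h : s ≠ "a") : ctx s = [] := by simp [ctx, h]

lemma adjA_cons_cons (x a' c : Char) (t : List Char) :
    adjA x (a' :: c :: t) = ((a' = 'a' && c = x) || adjA x (c :: t)) := by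
  simp [adjA]

lemma step5 (prev : String) (c : Char) (t : List Char) :
    max (if prev = "a" then max (s5.getD c 1) (p5.getD c 1) else s5.getD c 1)
        (g5 (ctx (String.singleton c) ++ t)) = g5 (ctx prev ++ c :: t) := by
  rw [s5_getD, p5_getD]
  have hsa : String.singleton 'a' = "a" := rfl
  by_cases hca : c = 'a'
  · subst hca
    rw [hsa, ctx_a, List.singleton_append]
    by_cases hp : prev = "a"
    · rw [hp, ctx_a, List.singleton_append]
      simp [g5, adjA_cons_cons]
      split_ifs <;> omega
    · rw [ctx_ne hp, List.nil_append, if_neg hp]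
      simp [g5]
      split_ifs <;> omega
  · rw [ctx_ne (fun h => hca ((singleton_eq_a c).mp h)), List.nil_append]
    by_cases hp : prev = "a"
    · rw [hp, ctx_a, List.singleton_append, if_pos rfl]
      rcases eq_or_ne c 'x' with rfl | h1
      · simp [g5, adjA_cons_cons, adjA_cons_ne 'x' t hca, adjA_cons_ne 'c' t hca]
        split_ifs <;> omega
      rcases eq_or_ne c 'c' with rfl | h2
      · simp [g5, adjA_cons_cons, adjA_cons_ne 'x' t hca, adjA_cons_ne 'c' t hca]
        split_ifs <;> omega
      rcases eq_or_ne c 'n' with rfl | h3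
      · simp [g5, adjA_cons_cons, adjA_cons_ne 'x' t hca, adjA_cons_ne 'c' t hca]
        split_ifs <;> omega
      · simp [g5, adjA_cons_cons, adjA_cons_ne 'x' t hca, adjA_cons_ne 'c' t hca,
          h1, h2, h3, Ne.symm h3]
        split_ifs <;> omega
    · rw [ctx_ne hp, List.nil_append, if_neg hp]
      rcases eq_or_ne c 'n' with rfl | h3
      · simp [g5, adjA_cons_ne 'x' t hca, adjA_cons_ne 'c' t hca]
        split_ifs <;> omega
      · simp [g5, adjA_cons_ne 'x' t hca, adjA_cons_ne 'c' t hca, h3, Ne.symm h3]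
        split_ifs <;> omega

lemma fold5 (l : List Char) : ∀ (best : Int) (prev : String), 1 ≤ best →
    (l.foldl (altStep s5 p5) (best, prev)).1 = max best (g5 (ctx prev ++ l)) := by
  induction l with
  | nil =>
    intro best prev h
    simp only [List.foldl_nil, List.append_nil]
    unfold ctx
    split_ifs <;> simp [g5, adjA] <;> omega
  | cons c t ih =>
    intro best prev h
    have hr1 : 1 ≤ (if prev = "a" then max (s5.getD c 1) (p5.getD c 1) else s5.getD c 1) := by
      rw [s5_getD, p5_getD]; split_ifs <;> omega
    have hstep : altStep s5 p5 (best, prev) c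
        = (max best (if prev = "a" then max (s5.getD c 1) (p5.getD c 1) else s5.getD c 1),
           String.singleton c) := by
      simp only [altStep, Prod.mk.injEq]
      split_ifs <;> exact ⟨by omega, trivial⟩
    rw [List.foldl_cons, hstep, ih _ _ (by omega)]
    rw [max_assoc, step5 prev c t]

-- A's early-return loop computes the max-form score, band 2
lemma loop2_eq_g2 (os : String) :
    opStdLoop os [("n", 4), ("g", 3), ("b", 2)] = g2 os.toList := by
  have hn : PySem.Chars.isIn ['n'] os.toList = true ↔ 'n' ∈ os.toList := by
    rw [PySem.Chars.isIn_iff_infix]; exact List.singleton_infix_iff _ _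
  have hg : PySem.Chars.isIn ['g'] os.toList = true ↔ 'g' ∈ os.toList := by
    rw [PySem.Chars.isIn_iff_infix]; exact List.singleton_infix_iff _ _
  have hb : PySem.Chars.isIn ['b'] os.toList = true ↔ 'b' ∈ os.toList := by
    rw [PySem.Chars.isIn_iff_infix]; exact List.singleton_infix_iff _ _
  by_cases h1 : 'n' ∈ os.toList <;> by_cases h2 : 'g' ∈ os.toList <;>
    by_cases h3 : 'b' ∈ os.toList <;>
      simp [opStdLoop, g2, hn, hg, hb, h1, h2, h3]

-- A's early-return loop computes the max-form score, band 5
lemma loop5_eq_g5 (os : String) :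
    opStdLoop os [("ax", 7), ("ac", 6), ("n", 5)] = g5 os.toList := by
  have hx : PySem.Chars.isIn ['a', 'x'] os.toList = true ↔ adjA 'x' os.toList = true := by
    rw [PySem.Chars.isIn_iff_infix, adjA_iff]
  have hc : PySem.Chars.isIn ['a', 'c'] os.toList = true ↔ adjA 'c' os.toList = true := by
    rw [PySem.Chars.isIn_iff_infix, adjA_iff]
  have hn : PySem.Chars.isIn ['n'] os.toList = true ↔ 'n' ∈ os.toList := by
    rw [PySem.Chars.isIn_iff_infix]; exact List.singleton_infix_iff _ _
  by_cases h1 : adjA 'x' os.toList = true <;> by_cases h2 : adjA 'c' os.toList = true <;>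
    by_cases h3 : 'n' ∈ os.toList <;>
      simp [opStdLoop, g5, hx, hc, hn, h1, h2, h3]

-- ===== VERDICT =====
theorem op_standard_spec : Claim_equal_op_standard := by
  intro radio _ hpre
  unfold Spec_op_standard op_standard op_standard_alt
  have h2 : ∀ os : String,
      (os.toList.foldl (altStep (PySem.Dict.mk [('n', 4), ('g', 3), ('b', 2)])
        (PySem.Dict.mk [])) (1, "")).1 = g2 os.toList := by
    intro os
    have := fold2 os.toList 1 "" (by omega)
    simp only [s2, p2] at this
    rw [this]
    have := one_le_g2 os.toList
    omega
  have h5 : ∀ os : String,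
      (os.toList.foldl (altStep (PySem.Dict.mk [('n', 5)])
        (PySem.Dict.mk [('x', 7), ('c', 6)])) (1, "")).1 = g5 os.toList := by
    intro os
    have := fold5 os.toList 1 "" (by omega)
    simp only [s5, p5, ctx, if_neg (by decide : ¬("" : String) = "a"), List.nil_append] at this
    rw [this]
    have := one_le_g5 os.toList
    omega
  rcases hpre with h | h <;> simp only [h] <;> simp [h2, h5, loop2_eq_g2, loop5_eq_g5]
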